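-- pv_equiv track=rewrite | github.com/htingwang/HandsOnAlgoDS | LeetCode/1504.Count-Submatrices-With-All-Ones/Count-Submatrices-With-All-Ones.py | numSubmat2
-- ===== SOURCE A (Python) =====
-- def numSubmat2(mat):
--     if not mat or not mat[0]: return 0
--     res = 0
--     m, n = len(mat), len(mat[0])
--     for i in range(m):
--         for j in range(n):
--             if j and mat[i][j]: mat[i][j] += mat[i][j - 1]
--             w = float('inf')
--             for k in range(i, -1, -1):
--                 if mat[k][j] == 0: break
--                 w = min(w, mat[k][j])
--                 res += w
--     return res
-- ===== SOURCE B (Python) =====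
-- def numSubmat2(mat):
--     # Monotonic-stack over per-column width histograms: O(m*n) instead of A's
--     # O(m^2*n) upward scans. Return-value equivalent; unlike A, does not mutate mat.
--     if not mat or not mat[0]:
--         return 0
--     n = len(mat[0])
--     res = 0
--     stacks = [[] for _ in range(n)]   # per column: stack of (width, count), increasing from bottom
--     sums = [0] * n                    # per column: current sum of suffix minima
--     for row in mat:
--         w = 0
--         for j in range(n):
--             x = row[j]
--             w = x + w if x and j else x
--             if w == 0:
--                 stacks[j] = []
--                 sums[j] = 0
--             else:
--                 st = stacks[j]
--                 cnt = 1
--                 s = sums[j]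
--                 while st and st[-1][0] >= w:
--                     v, c = st.pop()
--                     cnt += c
--                     s -= v * c
--                 st.append((w, cnt))
--                 s += w * cnt
--                 sums[j] = s
--                 res += s
--     return res
-- ===== Notes on version B (the rewrite author's own statement) =====
-- stated objective: faster
-- what changed: Replaces A's per-cell upward column rescan with a per-column monotonic stack of (width,count) pairs over the row-width histogram, maintaining each column's sum of suffix minima incrementally; B also does not mutate the input matrix.
import Mathlib
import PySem

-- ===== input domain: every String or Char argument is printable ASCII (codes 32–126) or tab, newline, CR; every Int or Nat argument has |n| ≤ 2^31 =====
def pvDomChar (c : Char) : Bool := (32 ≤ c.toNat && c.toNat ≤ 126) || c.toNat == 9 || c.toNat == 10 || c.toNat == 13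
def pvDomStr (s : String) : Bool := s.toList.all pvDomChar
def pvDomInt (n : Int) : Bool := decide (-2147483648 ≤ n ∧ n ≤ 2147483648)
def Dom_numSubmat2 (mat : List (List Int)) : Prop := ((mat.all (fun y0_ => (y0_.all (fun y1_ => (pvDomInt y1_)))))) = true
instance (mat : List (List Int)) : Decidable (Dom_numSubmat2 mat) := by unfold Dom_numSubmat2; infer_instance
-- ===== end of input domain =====

-- B replaces A's per-cell upward column scan with a per-column monotonic stack over the
-- row-width histogram (O(m*n) instead of O(m^2*n)); equivalence is about the RETURN value
-- only: A mutates `mat` in place (accumulating row widths), B does not.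

-- ===== PORT A =====
-- mat[i][j] with nonnegative in-range indices (Pre_ guarantees in-range; default never read inside Pre_)
def pyGet2 (mat : List (List Int)) (i j : Nat) : Int := (mat.getD i []).getD j 0

-- inner `for k in range(i, -1, -1)` loop: w = float('inf') is `none`; break on 0
def innerA (mat : List (List Int)) (j : Nat) : Nat → Option Int → Int → Int
  | k, w, res =>
    let v := pyGet2 mat k j
    if v = 0 then res
    else
      let w' := match w with | none => v | some x => min x v
      match k with
      | 0 => res + w'
      | Nat.succ k' => innerA mat j k' (some w') (res + w')

-- body of the j-loop: in-place update `mat[i][j] += mat[i][j-1]`, then the k-scan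
def cellA (i : Nat) (st : List (List Int) × Int) (j : Nat) : List (List Int) × Int :=
  let mat := st.1
  let mat' := if j ≠ 0 ∧ pyGet2 mat i j ≠ 0
              then mat.modify i (fun row => row.set j (pyGet2 mat i j + pyGet2 mat i (j - 1)))
              else mat
  (mat', innerA mat' j i none st.2)

def numSubmat2 (mat : List (List Int)) : Int :=
  match mat with
  | [] => 0
  | r0 :: _ =>
    if r0.length = 0 then 0
    else
      ((List.range mat.length).foldl
        (fun st i => (List.range r0.length).foldl (cellA i) st) (mat, 0)).2

-- ===== PORT B =====
-- per-column state: (stack of (width, count), current sum of suffix minima); stack top = head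
-- `while st and st[-1][0] >= w: v, c = st.pop(); cnt += c; s -= v * c`
def popGE (w : Int) : List (Int × Int) → Int → Int → List (Int × Int) × Int × Int
  | [], cnt, s => ([], cnt, s)
  | (v, c) :: st, cnt, s =>
    if w ≤ v then popGE w st (cnt + c) (s - v * c)
    else ((v, c) :: st, cnt, s)

-- one column update for new width w; returns (new column state, amount added to res)
def colStep (w : Int) (cs : List (Int × Int) × Int) : (List (Int × Int) × Int) × Int :=
  if w = 0 then (([], 0), 0)
  else
    let t := popGE w cs.1 1 cs.2
    let s' := t.2.2 + w * t.2.1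
    (((w, t.2.1) :: t.1, s'), s')

-- the j-loop over one row: x :: xs zipped with the column states, carrying the running width
def rowB (prev : Int) (first : Bool) : List Int → List ((List (Int × Int)) × Int) →
    List ((List (Int × Int)) × Int) × Int
  | [], _ => ([], 0)
  | _ :: _, [] => ([], 0)   -- unreachable: row has exactly n entries, one per column state
  | x :: xs, cs :: cols =>
    let w := if x ≠ 0 ∧ first = false then x + prev else x
    let p := colStep w cs
    let q := rowB w false xs cols
    (p.1 :: q.1, p.2 + q.2)

def numSubmat2_alt (mat : List (List Int)) : Int :=
  match mat with
  | [] => 0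
  | r0 :: _ =>
    if r0.length = 0 then 0
    else
      (mat.foldl
        (fun (st : List ((List (Int × Int)) × Int) × Int) row =>
          let p := rowB 0 true (row.take r0.length) st.1
          (p.1, st.2 + p.2))
        (List.replicate r0.length ([], 0), 0)).2

-- ===== PRECONDITION & SPEC =====
-- Pre_ excludes exactly the inputs on which Python A raises IndexError: a row shorter than row 0.
def Pre_numSubmat2 (mat : List (List Int)) : Prop :=
  ∀ r ∈ mat, (mat.headD []).length ≤ r.length
instance (mat : List (List Int)) : Decidable (Pre_numSubmat2 mat) := by
  unfold Pre_numSubmat2; infer_instance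

def pvWitness_numSubmat2 : List (List Int) := [[1, 0, 1], [1, 1, 1]]

def Spec_numSubmat2 (mat : List (List Int)) (out : Int) : Prop := out = numSubmat2_alt mat
instance (mat : List (List Int)) (out : Int) : Decidable (Spec_numSubmat2 mat out) := by
  unfold Spec_numSubmat2; infer_instance

-- ===== CLAIM (what is proved, stated in full; the proofs are below) =====
def Claim_equal_numSubmat2 : Prop :=
  ∀ (mat : List (List Int)), Dom_numSubmat2 mat → Pre_numSubmat2 mat →
    Spec_numSubmat2 mat (numSubmat2 mat)

-- ===== LEMMAS AND PROOFS =====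

-- width of cell j of row r (the value A stores into mat[i][j], B computes on the fly)
def wIdx (r : List Int) : Nat → Int
  | 0 => r.getD 0 0
  | j + 1 => if r.getD (j + 1) 0 ≠ 0 then r.getD (j + 1) 0 + wIdx r j else r.getD (j + 1) 0

-- column j of the widthified rows, newest (bottom) row first
def colW (rows : List (List Int)) (j : Nat) : List Int :=
  (rows.map (fun r => wIdx r j)).reverse

-- suffix minima of the window after the last zero, newest first
def msR : List Int → List Int
  | [] => []
  | h :: rest => if h = 0 then [] else h :: (msR rest).map (fun v => min h v)

-- common reference value: total contribution of one row / of all rows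
def rowSum (rows : List (List Int)) (n : Nat) : Int :=
  ((List.range n).map (fun j => (msR (colW rows j)).sum)).sum

def specFrom (done : List (List Int)) (n : Nat) : List (List Int) → Int
  | [] => 0
  | r :: rest => rowSum (done ++ [r]) n + specFrom (done ++ [r]) n rest

-- ---- A side ----

-- abstract value of innerA's scan
def cvA : List Int → Option Int → Int
  | [], _ => 0
  | v :: rest, w =>
    if v = 0 then 0
    else
      let w' := match w with | none => v | some x => min x v
      w' + cvA rest (some w')

-- column j of mat read from row k down to row 0
def colList (mat : List (List Int)) (j : Nat) : Nat → List Int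
  | 0 => [pyGet2 mat 0 j]
  | k + 1 => pyGet2 mat (k + 1) j :: colList mat j k

-- fully widthified row (only first n cells ever touched/read)
def wRow (n : Nat) (r : List Int) : List Int := (List.range n).map (wIdx r) ++ r.drop n
def Wfull (n : Nat) (rows : List (List Int)) : List (List Int) := rows.map (wRow n)
-- row r with its first j cells widthified (A's in-place state inside the j-loop)
def prRow (r : List Int) (j : Nat) : List Int := (List.range j).map (wIdx r) ++ r.drop j

theorem innerA_eq_cvA (mat : List (List Int)) (j : Nat) :
    ∀ (k : Nat) (w : Option Int) (res : Int),
      innerA mat j k w res = res + cvA (colList mat j k) w := by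
  intro k
  induction k with
  | zero =>
      intro w res
      rw [innerA.eq_def]
      simp only [colList, cvA]
      split <;> simp
  | succ k ih =>
      intro w res
      rw [innerA.eq_def]
      simp only [colList, cvA]
      split
      · simp
      · simp only [ih]; ring_nf

theorem cvA_some (l : List Int) :
    ∀ x : Int, cvA l (some x) = ((msR l).map (fun v => min x v)).sum := by
  induction l with
  | nil => intro x; simp [cvA, msR]
  | cons v rest ih =>
      intro x
      simp only [cvA, msR]
      by_cases hv : v = 0
      · simp [hv]
      · simp only [hv, if_false]
        simp [ih, List.map_map, Function.comp_def, min_assoc]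

theorem cvA_none (l : List Int) : cvA l none = (msR l).sum := by
  cases l with
  | nil => simp [cvA, msR]
  | cons v rest =>
      simp only [cvA, msR]
      by_cases hv : v = 0
      · simp [hv]
      · simp only [hv, if_false]
        rw [cvA_some]
        simp

-- reading the widthified structures
theorem wRow_getD (n : Nat) (r : List Int) (j : Nat) (hj : j < n) :
    (wRow n r).getD j 0 = wIdx r j := by
  unfold wRow
  rw [List.getD_append _ _ _ j (by simpa using hj)]
  simp [List.getD_eq_getElem?_getD, hj]

theorem pyGet2_Wfull (n : Nat) (rows tail : List (List Int)) (k j : Nat)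
    (hk : k < rows.length) (hj : j < n) :
    pyGet2 (Wfull n rows ++ tail) k j = wIdx (rows.getD k []) j := by
  unfold pyGet2 Wfull
  rw [List.getD_append _ _ _ k (by simpa using hk)]
  rw [show (rows.map (wRow n)).getD k [] = wRow n rows[k] from by
    rw [List.getD_eq_getElem?_getD]
    simp [List.getElem?_eq_getElem hk]]
  rw [wRow_getD n _ j hj]
  rw [show rows.getD k [] = rows[k] from by
    rw [List.getD_eq_getElem?_getD, List.getElem?_eq_getElem hk]; rfl]

theorem prRow_getD_lt (r : List Int) (j k : Nat) (hk : k < j) :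
    (prRow r j).getD k 0 = wIdx r k := by
  unfold prRow
  rw [List.getD_append _ _ _ k (by simpa using hk)]
  simp [List.getD_eq_getElem?_getD, hk]

theorem prRow_getD_self (r : List Int) (j : Nat) (hj : j < r.length) :
    (prRow r j).getD j 0 = r.getD j 0 := by
  unfold prRow
  rw [List.getD_append_right _ _ _ j (by simp)]
  simp [List.getD_eq_getElem?_getD, List.getElem?_drop, hj]

theorem prRow_zero (r : List Int) : prRow r 0 = r := by simp [prRow]

theorem prRow_succ (r : List Int) (j : Nat) (hj : j < r.length) :
    prRow r (j + 1) = (List.range j).map (wIdx r) ++ wIdx r j :: r.drop (j + 1) := by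
  unfold prRow
  rw [List.range_succ, List.map_append]
  simp

theorem prRow_full (n : Nat) (r : List Int) : prRow r n = wRow n r := rfl

-- ---- A side: the per-cell step ----

theorem colList_congr (M M' : List (List Int)) (j : Nat) :
    ∀ K, (∀ k ≤ K, pyGet2 M k j = pyGet2 M' k j) → colList M j K = colList M' j K := by
  intro K
  induction K with
  | zero => intro h; simp [colList, h 0 (le_refl 0)]
  | succ k ih =>
      intro h
      simp only [colList]
      rw [h (k + 1) (le_refl _), ih (fun k' hk' => h k' (Nat.le_succ_of_le hk'))]

theorem colList_Wfull (n : Nat) (rows tail : List (List Int)) (j : Nat) (hj : j < n) :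
    ∀ K, K < rows.length →
      colList (Wfull n rows ++ tail) j K = colW (rows.take (K + 1)) j := by
  intro K
  induction K with
  | zero =>
      intro hK
      cases rows with
      | nil => simp at hK
      | cons r rows' =>
          simp [colList, colW, pyGet2_Wfull n (r :: rows') tail 0 j hK hj]
  | succ k ih =>
      intro hK
      simp only [colList]
      rw [pyGet2_Wfull n rows tail (k + 1) j hK hj, ih (Nat.lt_of_succ_lt hK)]
      rw [← List.take_concat_get hK, List.concat_eq_append]
      rw [show rows.getD (k + 1) [] = rows[k + 1] from by
        simp [List.getD_eq_getElem?_getD, List.getElem?_eq_getElem hK]]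
      have hK' : k + 1 < (rows.map (fun r => wIdx r j)).length := by simpa using hK
      simp only [colW, List.map_append, List.map_take]
      conv_rhs => rw [List.take_succ]
      simp [List.getElem?_eq_getElem hK', List.getElem?_map, List.getElem?_eq_getElem hK,
        List.take_succ]

theorem colList_prRow (n : Nat) (done rest : List (List Int)) (r : List Int) (j : Nat)
    (hj : j < n) :
    colList (Wfull n done ++ prRow r (j + 1) :: rest) j done.length
      = colW (done ++ [r]) j := by
  have hcongr : ∀ k ≤ done.length,
      pyGet2 (Wfull n done ++ prRow r (j + 1) :: rest) k j
        = pyGet2 (Wfull n (done ++ [r]) ++ rest) k j := by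
    intro k hk
    rcases Nat.lt_or_ge k done.length with hlt | hge
    · rw [pyGet2_Wfull n done _ k j hlt hj,
          pyGet2_Wfull n (done ++ [r]) rest k j (by simp; omega) hj,
          List.getD_append _ _ _ k hlt]
    · have hk' : k = done.length := le_antisymm hk hge
      subst hk'
      rw [pyGet2_Wfull n (done ++ [r]) rest _ j (by simp) hj]
      unfold pyGet2
      rw [List.getD_append_right _ _ _ _ (by simp [Wfull])]
      simp only [Wfull, List.length_map, Nat.sub_self, List.getD_cons_zero]
      rw [prRow_getD_lt r (j + 1) j (Nat.lt_succ_self j)]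
      rw [List.getD_append_right _ _ _ _ (le_refl _)]
      simp
  rw [colList_congr _ _ j done.length hcongr]
  have h := colList_Wfull n (done ++ [r]) rest j hj done.length (by simp)
  rw [show done.length + 1 = (done ++ [r]).length by simp, List.take_length] at h
  exact h

theorem cellA_step (n : Nat) (done rest : List (List Int)) (r : List Int) (res : Int)
    (j : Nat) (hj : j < n) (hr : n ≤ r.length) :
    cellA done.length (Wfull n done ++ prRow r j :: rest, res) j
      = (Wfull n done ++ prRow r (j + 1) :: rest,
         res + (msR (colW (done ++ [r]) j)).sum) := by
  have hjr : j < r.length := lt_of_lt_of_le hj hr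
  have hWlen : (Wfull n done).length = done.length := by simp [Wfull]
  have hgetM : (Wfull n done ++ prRow r j :: rest).getD done.length [] = prRow r j := by
    rw [List.getD_append_right _ _ _ _ (le_of_eq hWlen)]
    simp [hWlen]
  have hget_self : pyGet2 (Wfull n done ++ prRow r j :: rest) done.length j = r.getD j 0 := by
    unfold pyGet2; rw [hgetM]; exact prRow_getD_self r j hjr
  have hmat' : (if j ≠ 0 ∧ pyGet2 (Wfull n done ++ prRow r j :: rest) done.length j ≠ 0
        then (Wfull n done ++ prRow r j :: rest).modify done.length
               (fun row => row.set j
                 (pyGet2 (Wfull n done ++ prRow r j :: rest) done.length j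
                   + pyGet2 (Wfull n done ++ prRow r j :: rest) done.length (j - 1)))
        else Wfull n done ++ prRow r j :: rest)
      = Wfull n done ++ prRow r (j + 1) :: rest := by
    by_cases hc : j ≠ 0 ∧ r.getD j 0 ≠ 0
    · rw [if_pos (by rw [hget_self]; exact hc)]
      obtain ⟨hj0, hx⟩ := hc
      obtain ⟨jp, rfl⟩ : ∃ jp, j = jp + 1 := ⟨j - 1, by omega⟩
      have hget_prev : pyGet2 (Wfull n done ++ prRow r (jp + 1) :: rest) done.length jp
          = wIdx r jp := by
        unfold pyGet2; rw [hgetM]; exact prRow_getD_lt r (jp + 1) jp (Nat.lt_succ_self jp)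
      rw [List.modify_eq_set]
      rw [show ((Wfull n done ++ prRow r (jp + 1) :: rest)[done.length]?.getD default)
            = prRow r (jp + 1) from by
        rw [List.getElem?_append_right (le_of_eq hWlen)]
        simp [hWlen]]
      rw [hget_self, show jp + 1 - 1 = jp from rfl, hget_prev]
      rw [List.set_append, if_neg (by omega)]
      rw [show done.length - (Wfull n done).length = 0 by omega]
      rw [List.set_cons_zero]
      refine congrArg (fun row => Wfull n done ++ row :: rest) ?_
      unfold prRow
      rw [List.set_append, if_neg (by simp)]
      rw [show jp + 1 - ((List.range (jp + 1)).map (wIdx r)).length = 0 by simp]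
      rw [List.drop_eq_getElem_cons hjr, List.set_cons_zero]
      conv_rhs => rw [List.range_succ]
      simp only [List.map_append, List.map_cons, List.map_nil]
      rw [show wIdx r (jp + 1) = r.getD (jp + 1) 0 + wIdx r jp from by
        rw [wIdx, if_pos hx]]
      simp
    · rw [if_neg (by rw [hget_self]; exact hc)]
      refine congrArg (fun row => Wfull n done ++ row :: rest) ?_
      by_cases hj0 : j = 0
      · subst hj0
        rw [prRow_zero]
        cases r with
        | nil => simp at hjr
        | cons x t => simp [prRow, wIdx]
      · have hx : r.getD j 0 = 0 := by
          by_contra hxx; exact hc ⟨hj0, hxx⟩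
        obtain ⟨jp, rfl⟩ : ∃ jp, j = jp + 1 := ⟨j - 1, by omega⟩
        have hw : wIdx r (jp + 1) = r.getD (jp + 1) 0 := by
          rw [wIdx, if_neg (by simpa using hx)]
        rw [prRow_succ r (jp + 1) hjr, hw]
        unfold prRow
        rw [List.drop_eq_getElem_cons hjr]
        congr 2
        simp [List.getD_eq_getElem?_getD, List.getElem?_eq_getElem hjr]
  unfold cellA
  simp only []
  rw [hmat']
  rw [innerA_eq_cvA, cvA_none, colList_prRow n done rest r j hj]

theorem rowA (n : Nat) (done rest : List (List Int)) (r : List Int)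
    (hr : n ≤ r.length) :
    ∀ (t j : Nat), j + t = n → ∀ res : Int,
      (List.range' j t).foldl (cellA done.length) (Wfull n done ++ prRow r j :: rest, res)
        = (Wfull n done ++ prRow r n :: rest,
           res + ((List.range' j t).map (fun j' => (msR (colW (done ++ [r]) j')).sum)).sum) := by
  intro t
  induction t with
  | zero => intro j hj res; simp at hj; subst hj; simp
  | succ t ih =>
      intro j hj res
      rw [List.range'_succ]
      simp only [List.foldl_cons]
      rw [cellA_step n done rest r res j (by omega) hr]
      rw [ih (j + 1) (by omega)]
      simp [add_assoc]

theorem outerA (n : Nat) :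
    ∀ (rem done : List (List Int)) (res : Int), (∀ r ∈ rem, n ≤ r.length) →
      (List.range' done.length rem.length).foldl
          (fun st i => (List.range n).foldl (cellA i) st) (Wfull n done ++ rem, res)
        = (Wfull n (done ++ rem), res + specFrom done n rem) := by
  intro rem
  induction rem with
  | nil => intro done res _; simp [specFrom]
  | cons r rest ih =>
      intro done res hlen
      simp only [List.length_cons, List.range'_succ, List.foldl_cons]
      have h0 : prRow r 0 = r := prRow_zero r
      rw [show (Wfull n done ++ r :: rest : List (List Int))
            = Wfull n done ++ prRow r 0 :: rest by rw [h0]]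
      rw [show (List.range n).foldl (cellA done.length)
              (Wfull n done ++ prRow r 0 :: rest, res)
            = (Wfull n done ++ prRow r n :: rest,
               res + ((List.range n).map
                 (fun j' => (msR (colW (done ++ [r]) j')).sum)).sum) from by
        rw [List.range_eq_range']
        exact rowA n done rest r (hlen r (by simp)) n 0 (by omega) res]
      have : Wfull n done ++ prRow r n :: rest = Wfull n (done ++ [r]) ++ rest := by
        simp [Wfull, prRow_full]
      rw [this]
      have hlen' : done.length + 1 = (done ++ [r]).length := by simp
      rw [hlen', ih (done ++ [r]) _ (fun r' hr' => hlen r' (by simp [hr']))]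
      simp only [specFrom, rowSum, List.range_eq_range']
      ring_nf
      simp [List.append_assoc]

-- ---- B side ----

def expandSt : List (Int × Int) → List Int :=
  fun st => st.flatMap (fun p => List.replicate p.2.toNat p.1)

def InvB (cs : List (Int × Int) × Int) (c : List Int) : Prop :=
  expandSt cs.1 = msR c ∧ cs.2 = (msR c).sum ∧ ∀ p ∈ cs.1, 0 < p.2

theorem msR_pairwise (c : List Int) : (msR c).Pairwise (· ≥ ·) := by
  induction c with
  | nil => simp [msR]
  | cons h rest ih =>
      simp only [msR]
      split
      · simp
      · refine List.Pairwise.cons ?_ (ih.map _ (fun a b hab => by simp; omega))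
        intro v hv
        simp only [List.mem_map] at hv
        obtain ⟨u, _, rfl⟩ := hv
        exact min_le_left _ _

theorem popGE_spec (w : Int) :
    ∀ (st : List (Int × Int)) (l : List Int) (cnt s : Int),
      expandSt st = l → l.Pairwise (· ≥ ·) → (∀ p ∈ st, 0 < p.2) →
      ∃ st', popGE w st cnt s
          = (st', cnt + ((l.takeWhile (fun v => w ≤ v)).length : Int),
             s - (l.takeWhile (fun v => w ≤ v)).sum)
        ∧ expandSt st' = l.dropWhile (fun v => w ≤ v)
        ∧ (∀ p ∈ st', 0 < p.2) := by
  intro st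
  induction st with
  | nil =>
      intro l cnt s hexp _ _
      refine ⟨[], ?_, ?_, by simp⟩
      · simp only [expandSt, List.flatMap_nil] at hexp
        subst hexp
        simp [popGE]
      · simp only [expandSt, List.flatMap_nil] at hexp
        subst hexp
        simp [expandSt]
  | cons p st ih =>
      obtain ⟨v, c⟩ := p
      intro l cnt s hexp hpw hpos
      have hc : 0 < c := hpos (v, c) (by simp)
      have hexp' : l = List.replicate c.toNat v ++ expandSt st := by
        rw [← hexp]; simp [expandSt]
      have hcn : (c.toNat : Int) = c := Int.toNat_of_nonneg (le_of_lt hc)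
      have hcpos : 0 < c.toNat := by omega
      by_cases hw : w ≤ v
      · have hdec : (decide (w ≤ v)) = true := by simpa using hw
        have hrec := ih (expandSt st) (cnt + c) (s - v * c) rfl
          (hpw.sublist (by rw [hexp']; exact List.sublist_append_right _ _))
          (fun q hq => hpos q (by simp [hq]))
        obtain ⟨st', heq, hexp2, hpos2⟩ := hrec
        refine ⟨st', ?_, ?_, hpos2⟩
        · rw [show popGE w ((v, c) :: st) cnt s = popGE w st (cnt + c) (s - v * c) from by
            rw [popGE, if_pos hw]]
          rw [heq, hexp']
          simp only [List.takeWhile_append, List.takeWhile_replicate, hdec, if_true,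
            List.length_replicate, eq_self_iff_true, List.length_append, List.sum_append,
            List.sum_replicate, nsmul_eq_mul, hcn, Prod.mk.injEq]
          and_intros <;> (try trivial) <;> (push_cast [hcn]; try ring)
        · rw [hexp2, hexp']
          simp [List.dropWhile_append, List.dropWhile_replicate, hdec]
      · have hdec : (decide (w ≤ v)) = false := by simpa using hw
        refine ⟨(v, c) :: st, ?_, ?_, hpos⟩
        · rw [show popGE w ((v, c) :: st) cnt s = ((v, c) :: st, cnt, s) from by
            rw [popGE, if_neg hw]]
          obtain ⟨m, hm⟩ : ∃ m, c.toNat = m + 1 := ⟨c.toNat - 1, by omega⟩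
          rw [hexp', hm, List.replicate_succ, List.cons_append, List.takeWhile_cons, hdec]
          simp
        · obtain ⟨m, hm⟩ : ∃ m, c.toNat = m + 1 := ⟨c.toNat - 1, by omega⟩
          rw [hexp', hm, List.replicate_succ, List.cons_append, List.dropWhile_cons, hdec]
          simp only [Bool.false_eq_true, if_false]
          rw [← List.cons_append, ← List.replicate_succ, ← hm, ← hexp']
          exact hexp

theorem map_min_split (w : Int) (l : List Int) (hl : l.Pairwise (· ≥ ·)) :
    l.map (fun v => min w v)
      = List.replicate (l.takeWhile (fun v => w ≤ v)).length w
          ++ l.dropWhile (fun v => w ≤ v) := by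
  induction l with
  | nil => simp
  | cons v tl ih =>
      by_cases hv : w ≤ v
      · simp only [List.map_cons, List.takeWhile_cons, List.dropWhile_cons]
        rw [if_pos (by simpa using hv), if_pos (by simpa using hv)]
        simp [min_eq_left hv, ih (List.Pairwise.of_cons hl), List.replicate_succ]
      · simp only [List.map_cons, List.takeWhile_cons, List.dropWhile_cons]
        rw [if_neg (by simpa using hv), if_neg (by simpa using hv)]
        simp only [List.length_nil, List.replicate_zero, List.nil_append]
        have hall : ∀ u ∈ tl, u ≤ v := by
          intro u hu
          exact List.rel_of_pairwise_cons hl hu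
        rw [min_eq_right (le_of_not_ge hv)]
        congr 1
        calc tl.map (fun u => min w u) = tl.map id := by
              refine List.map_congr_left (fun u hu => ?_)
              have h1 : u ≤ v := List.rel_of_pairwise_cons hl hu
              have h2 : v < w := lt_of_not_ge hv
              simp [min_eq_right (le_of_lt (lt_of_le_of_lt h1 h2))]
          _ = tl := List.map_id tl

theorem colStep_inv (w : Int) (cs : List (Int × Int) × Int) (c : List Int)
    (h : InvB cs c) :
    (colStep w cs).2 = (msR (w :: c)).sum ∧ InvB (colStep w cs).1 (w :: c) := by
  obtain ⟨hexp, hsum, hpos⟩ := h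
  by_cases hw : w = 0
  · subst hw
    refine ⟨by simp [colStep, msR], ?_, ?_, ?_⟩ <;> simp [colStep, msR, expandSt, InvB]
  · have hpw := msR_pairwise c
    obtain ⟨st', heq, hexp', hpos'⟩ := popGE_spec w cs.1 (msR c) 1 cs.2 hexp hpw hpos
    have hmap := map_min_split w (msR c) hpw
    have hsplit := List.takeWhile_append_dropWhile
      (p := fun v => decide (w ≤ v)) (l := msR c)
    have hmsr : msR (w :: c)
        = List.replicate (((msR c).takeWhile (fun v => decide (w ≤ v))).length + 1) w
            ++ (msR c).dropWhile (fun v => decide (w ≤ v)) := by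
      rw [msR, if_neg hw, hmap, List.replicate_succ]
      simp
    have hcolstep : colStep w cs
        = (((w, 1 + (((msR c).takeWhile (fun v => decide (w ≤ v))).length : Int)) :: st',
            cs.2 - ((msR c).takeWhile (fun v => decide (w ≤ v))).sum
              + w * (1 + (((msR c).takeWhile (fun v => decide (w ≤ v))).length : Int))),
           cs.2 - ((msR c).takeWhile (fun v => decide (w ≤ v))).sum
              + w * (1 + (((msR c).takeWhile (fun v => decide (w ≤ v))).length : Int))) := by
      unfold colStep
      rw [if_neg hw, heq]
    have hs2 : cs.2 = ((msR c).takeWhile (fun v => decide (w ≤ v))).sum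
        + ((msR c).dropWhile (fun v => decide (w ≤ v))).sum := by
      rw [hsum, ← List.sum_append, hsplit]
    have hsumval : cs.2 - ((msR c).takeWhile (fun v => decide (w ≤ v))).sum
          + w * (1 + (((msR c).takeWhile (fun v => decide (w ≤ v))).length : Int))
        = (msR (w :: c)).sum := by
      rw [hmsr]
      simp only [List.sum_append, List.sum_replicate, nsmul_eq_mul]
      rw [hs2]
      push_cast
      ring
    refine ⟨?_, ?_, ?_, ?_⟩
    · rw [hcolstep]
      exact hsumval
    · rw [hcolstep]
      show expandSt (_ :: st') = _
      rw [show expandSt ((w, 1 + (((msR c).takeWhile (fun v => decide (w ≤ v))).length : Int))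
              :: st')
            = List.replicate (1 + (((msR c).takeWhile
                (fun v => decide (w ≤ v))).length : Int)).toNat w ++ expandSt st' from by
        simp [expandSt]]
      rw [hexp', hmsr]
      congr 1
      congr 1
      omega
    · rw [hcolstep]
      exact hsumval
    · rw [hcolstep]
      intro p hp
      rcases List.mem_cons.mp hp with hp1 | hp2
      · subst hp1
        have : (0 : Int) ≤ (((msR c).takeWhile (fun v => decide (w ≤ v))).length : Int) :=
          Int.natCast_nonneg _
        simp only []
        omega
      · exact hpos' p hp2

-- the widths B computes along one row
def wseqB (prev : Int) (first : Bool) : List Int → List Int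
  | [] => []
  | x :: xs =>
    let w := if x ≠ 0 ∧ first = false then x + prev else x
    w :: wseqB w false xs

theorem wseqB_cons (prev : Int) (first : Bool) (x : Int) (xs : List Int) :
    wseqB prev first (x :: xs)
      = (if x ≠ 0 ∧ first = false then x + prev else x)
          :: wseqB (if x ≠ 0 ∧ first = false then x + prev else x) false xs := rfl

theorem rowB_cons (prev : Int) (first : Bool) (x : Int) (xs : List Int)
    (cs : (List (Int × Int)) × Int) (cols : List ((List (Int × Int)) × Int)) :
    rowB prev first (x :: xs) (cs :: cols)
      = ((colStep (if x ≠ 0 ∧ first = false then x + prev else x) cs).1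
            :: (rowB (if x ≠ 0 ∧ first = false then x + prev else x) false xs cols).1,
         (colStep (if x ≠ 0 ∧ first = false then x + prev else x) cs).2
            + (rowB (if x ≠ 0 ∧ first = false then x + prev else x) false xs cols).2) := rfl

theorem wseqB_drop (r : List Int) :
    ∀ (t j : Nat), 0 < j → j + t ≤ r.length →
      wseqB (wIdx r (j - 1)) false ((r.drop j).take t) = (List.range' j t).map (wIdx r) := by
  intro t
  induction t with
  | zero => intro j _ _; simp [wseqB]
  | succ t ih =>
      intro j hj hlen
      have hjr : j < r.length := by omega
      obtain ⟨jp, rfl⟩ : ∃ jp, j = jp + 1 := ⟨j - 1, by omega⟩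
      rw [show ((r.drop (jp + 1)).take (t + 1)) = r[jp + 1] :: (r.drop (jp + 1 + 1)).take t from by
        rw [List.drop_eq_getElem_cons hjr, List.take_succ_cons]]
      rw [wseqB_cons]
      have hget : r.getD (jp + 1) 0 = r[jp + 1] := by
        simp [List.getD_eq_getElem?_getD, List.getElem?_eq_getElem hjr]
      have hw : (if r[jp + 1] ≠ 0 ∧ (false = false)
            then r[jp + 1] + wIdx r (jp + 1 - 1) else r[jp + 1]) = wIdx r (jp + 1) := by
        rw [Nat.add_sub_cancel, wIdx, hget]
        by_cases hx : r[jp + 1] = (0 : Int)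
        · rw [if_neg (by simp [hx]), if_neg (by simp [hx])]
        · rw [if_pos (by simp [hx]), if_pos (by simpa using hx)]
      rw [hw]
      rw [List.range'_succ]
      simp only [List.map_cons, List.cons.injEq]
      refine ⟨by trivial, ?_⟩
      have := ih (jp + 1 + 1) (by omega) (by omega)
      simpa using this

theorem wseqB_take (r : List Int) (n : Nat) (hn : 0 < n) (hr : n ≤ r.length) :
    wseqB 0 true (r.take n) = (List.range n).map (wIdx r) := by
  obtain ⟨m, rfl⟩ : ∃ m, n = m + 1 := ⟨n - 1, by omega⟩
  cases r with
  | nil => simp at hr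
  | cons x rr =>
      rw [show (x :: rr).take (m + 1) = x :: rr.take m from by simp]
      rw [wseqB_cons]
      rw [if_neg (by simp)]
      have hx0 : wIdx (x :: rr) 0 = x := by simp [wIdx]
      have htail : wseqB x false (rr.take m) = (List.range' 1 m).map (wIdx (x :: rr)) := by
        have := wseqB_drop (x :: rr) m 1 (by omega)
          (by simp only [List.length_cons] at hr ⊢; omega)
        simpa [hx0] using this
      rw [htail, List.range_eq_range', List.range'_succ]
      simp [hx0]

theorem rowB_inv :
    ∀ (xs : List Int) (cols : List ((List (Int × Int)) × Int)) (cws : List (List Int))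
      (prev : Int) (first : Bool),
      List.Forall₂ InvB cols cws →
      (rowB prev first xs cols).2
          = ((List.zip (wseqB prev first xs) cws).map
              (fun p => (msR (p.1 :: p.2)).sum)).sum
        ∧ List.Forall₂ InvB (rowB prev first xs cols).1
            (List.zipWith (fun w c => w :: c) (wseqB prev first xs) cws) := by
  intro xs
  induction xs with
  | nil =>
      intro cols cws prev first _
      simp [rowB, wseqB]
  | cons x xs ih =>
      intro cols cws prev first h
      cases h with
      | nil => simp [rowB, wseqB]
      | @cons cs cc cols' cws' hcc hrest =>
          rw [rowB_cons, wseqB_cons]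
          have hcol := colStep_inv (if x ≠ 0 ∧ first = false then x + prev else x) cs cc hcc
          have hrec := ih cols' cws' (if x ≠ 0 ∧ first = false then x + prev else x) false hrest
          constructor
          · simp only [List.zip_cons_cons, List.map_cons, List.sum_cons]
            rw [← hcol.1, ← hrec.1]
          · simp only [List.zipWith_cons_cons]
            exact List.Forall₂.cons hcol.2 hrec.2

theorem colW_snoc (done : List (List Int)) (r : List Int) (j : Nat) :
    colW (done ++ [r]) j = wIdx r j :: colW done j := by
  simp [colW]

theorem outerB (n : Nat) (hn : 0 < n) :
    ∀ (rem done : List (List Int)) (cols : List ((List (Int × Int)) × Int)) (res : Int),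
      (∀ r ∈ rem, n ≤ r.length) →
      List.Forall₂ InvB cols ((List.range n).map (fun j => colW done j)) →
      (rem.foldl
        (fun (st : List ((List (Int × Int)) × Int) × Int) row =>
          let p := rowB 0 true (row.take n) st.1
          (p.1, st.2 + p.2)) (cols, res)).2
        = res + specFrom done n rem := by
  intro rem
  induction rem with
  | nil => intro done cols res _ _; simp [specFrom]
  | cons r rest ih =>
      intro done cols res hlen hinv
      have hr : n ≤ r.length := hlen r (by simp)
      have hws := wseqB_take r n hn hr
      have hrowinv := rowB_inv (r.take n) cols ((List.range n).map (fun j => colW done j))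
        0 true hinv
      have hzipmap : ∀ {α : Type} (f : Int → List Int → α),
          List.zipWith f ((List.range n).map (wIdx r))
              ((List.range n).map (fun j => colW done j))
            = (List.range n).map (fun j => f (wIdx r j) (colW done j)) := by
        intro α f
        induction List.range n with
        | nil => simp
        | cons a t iht => simp [iht]
      simp only [List.foldl_cons]
      rw [ih (done ++ [r]) _ _ (fun r' hr' => hlen r' (by simp [hr'])) ?_]
      · have hval : (rowB 0 true (r.take n) cols).2 = rowSum (done ++ [r]) n := by
          rw [hrowinv.1, hws]
          rw [show List.zip ((List.range n).map (wIdx r))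
                ((List.range n).map (fun j => colW done j))
              = (List.range n).map (fun j => (wIdx r j, colW done j)) from List.zip_map' ..]
          rw [List.map_map]
          unfold rowSum
          congr 1
          refine List.map_congr_left (fun j _ => ?_)
          simp [colW_snoc]
        rw [hval]
        simp only [specFrom]
        ring
      · have h2 := hrowinv.2
        rw [hws, hzipmap (fun w c => w :: c)] at h2
        rw [show (List.range n).map (fun j => wIdx r j :: colW done j)
              = (List.range n).map (fun j => colW (done ++ [r]) j) from
          List.map_congr_left (fun j _ => (colW_snoc done r j).symm)] at h2
        exact h2


-- ===== VERDICT (by name: the statement is the Claim_ definition above) =====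
theorem numSubmat2_spec : Claim_equal_numSubmat2 := by
  intro mat _ hpre
  unfold Spec_numSubmat2
  cases mat with
  | nil => rfl
  | cons r0 tl =>
      by_cases h0 : r0.length = 0
      · simp [numSubmat2, numSubmat2_alt, h0]
      · have hlen : ∀ r ∈ r0 :: tl, r0.length ≤ r.length := by
          intro r hr
          have := hpre r hr
          simpa using this
        have hA : numSubmat2 (r0 :: tl) = specFrom [] r0.length (r0 :: tl) := by
          simp only [numSubmat2]
          rw [if_neg h0]
          have h1 := outerA r0.length (r0 :: tl) [] 0 hlen
          simp only [Wfull, List.map_nil, List.nil_append, List.length_nil] at h1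
          rw [← List.range_eq_range'] at h1
          rw [h1]
          simp
        have hB : numSubmat2_alt (r0 :: tl) = specFrom [] r0.length (r0 :: tl) := by
          simp only [numSubmat2_alt]
          rw [if_neg h0]
          have hinv : List.Forall₂ InvB (List.replicate r0.length ([], 0))
              ((List.range r0.length).map (fun j => colW [] j)) := by
            rw [show (List.range r0.length).map (fun j => colW [] j)
                  = List.replicate r0.length [] from by simp [colW, List.map_const']]
            induction r0.length with
            | zero => simp
            | succ k ihk =>
                simp only [List.replicate_succ]
                exact List.Forall₂.cons ⟨rfl, rfl, by simp⟩ ihk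
          have h2 := outerB r0.length (by omega) (r0 :: tl) []
            (List.replicate r0.length ([], 0)) 0 hlen hinv
          rw [h2]
          simp
        rw [hA, hB]
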